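-- pv_equiv track=rewrite | github.com/serg-bg/cerebellum-brain-tile-reconstructor | scripts/napari_roi_extractor.py | _infer_dimension_names
-- ===== SOURCE A (Python) =====
-- from typing import Dict, List, Optional, Tuple, Union
--
-- def _infer_dimension_names(shape: Tuple[int, ...]) -> List[str]:
--     """
--     Infer dimension names based on array shape.
--
--     Args:
--         shape: Array shape tuple
--
--     Returns:
--         List of dimension names
--     """
--     # Common patterns for microscopy data
--     if len(shape) == 5:
--         return ["t", "c", "z", "y", "x"]  # Time, Channel, Z, Y, X
--     elif len(shape) == 4:
--         return ["c", "z", "y", "x"]  # Channel, Z, Y, X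
--     elif len(shape) == 3:
--         return ["z", "y", "x"]  # Z, Y, X
--     elif len(shape) == 2:
--         return ["y", "x"]  # Y, X
--     else:
--         return [f"dim_{i}" for i in range(len(shape))]
-- ===== SOURCE B (Python) =====
-- def _infer_dimension_names(shape):
--     # Pair axes with canonical names from the fastest axis outward:
--     # walk the shape from the right, naming axes "x","y","z","c","t" in order.
--     rev_names = []
--     for name, _ in zip("xyzct", reversed(shape)):
--         rev_names.append(name)
--     if len(rev_names) == len(shape) and len(shape) >= 2:
--         rev_names.reverse()
--         return rev_names
--     return [f"dim_{i}" for i in range(len(shape))]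
-- ===== Notes on version B (the rewrite author's own statement) =====
-- stated objective: alternative
-- what changed: Instead of dispatching on len(shape) to pre-written literal lists, B traverses the shape itself from the right, zipping each axis with the canonical names 'x','y','z','c','t' and reversing the accumulated list; the zip running out (len>5) or len<2 triggers the dim_i fallback.
import Mathlib
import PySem

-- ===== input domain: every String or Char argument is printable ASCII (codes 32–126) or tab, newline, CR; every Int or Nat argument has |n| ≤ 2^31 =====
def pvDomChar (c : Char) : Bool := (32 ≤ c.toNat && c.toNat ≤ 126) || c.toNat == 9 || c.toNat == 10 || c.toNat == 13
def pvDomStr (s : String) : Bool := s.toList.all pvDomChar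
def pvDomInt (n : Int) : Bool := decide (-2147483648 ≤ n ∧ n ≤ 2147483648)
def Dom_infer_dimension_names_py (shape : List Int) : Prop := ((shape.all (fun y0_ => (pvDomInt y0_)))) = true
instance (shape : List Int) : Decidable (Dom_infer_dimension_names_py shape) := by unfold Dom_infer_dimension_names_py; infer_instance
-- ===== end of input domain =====

-- B names axes by zipping the reversed shape with the canonical names "xyzct" and reversing,
-- instead of A's if/elif dispatch on the length to literal lists (objective: alternative).

-- ===== PORT A =====
def infer_dimension_names_py (shape : List Int) : List String :=
  if shape.length = 5 then ["t", "c", "z", "y", "x"]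
  else if shape.length = 4 then ["c", "z", "y", "x"]
  else if shape.length = 3 then ["z", "y", "x"]
  else if shape.length = 2 then ["y", "x"]
  else (PySem.List.pyRange 0 (shape.length : Int) 1).map (fun i => "dim_" ++ PySem.Int.toStr i)

-- ===== PORT B =====
-- the for-loop over zip("xyzct", reversed(shape)), accumulating single-char names
def pvZipNames : List Char → List Int → List String
  | c :: cs, _ :: ss => String.mk [c] :: pvZipNames cs ss
  | _, _ => []

def infer_dimension_names_py_alt (shape : List Int) : List String :=
  let rev_names := pvZipNames "xyzct".toList shape.reverse
  if rev_names.length = shape.length ∧ 2 ≤ shape.length then rev_names.reverse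
  else (PySem.List.pyRange 0 (shape.length : Int) 1).map (fun i => "dim_" ++ PySem.Int.toStr i)

-- ===== PRECONDITION & SPEC =====
def Spec_infer_dimension_names_py (shape : List Int) (out : List String) : Prop := out = infer_dimension_names_py_alt shape
instance (shape : List Int) (out : List String) : Decidable (Spec_infer_dimension_names_py shape out) := by unfold Spec_infer_dimension_names_py; infer_instance

-- ===== CLAIM =====
def Claim_equal_infer_dimension_names_py : Prop := ∀ (shape : List Int), Dom_infer_dimension_names_py shape → Spec_infer_dimension_names_py shape (infer_dimension_names_py shape)

-- ===== LEMMAS AND PROOFS =====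

theorem pvZipNames_length (cs : List Char) (ss : List Int) :
    (pvZipNames cs ss).length = min cs.length ss.length := by
  induction cs generalizing ss with
  | nil => simp [pvZipNames]
  | cons c cs ih =>
    cases ss with
    | nil => simp [pvZipNames]
    | cons s ss => simp [pvZipNames, ih]

theorem infer_agree (shape : List Int) :
    infer_dimension_names_py shape = infer_dimension_names_py_alt shape := by
  rcases shape with _ | ⟨a, _ | ⟨b, _ | ⟨c, _ | ⟨d, _ | ⟨e, _ | ⟨f, rest⟩⟩⟩⟩⟩⟩
  · simp [infer_dimension_names_py, infer_dimension_names_py_alt, pvZipNames]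
  · simp [infer_dimension_names_py, infer_dimension_names_py_alt, pvZipNames]
  · simp only [infer_dimension_names_py, infer_dimension_names_py_alt, pvZipNames]
    norm_num
    rfl
  · simp only [infer_dimension_names_py, infer_dimension_names_py_alt, pvZipNames]
    norm_num
    rfl
  · simp only [infer_dimension_names_py, infer_dimension_names_py_alt, pvZipNames]
    norm_num
    rfl
  · simp only [infer_dimension_names_py, infer_dimension_names_py_alt, pvZipNames]
    norm_num
    rfl
  · -- length ≥ 6: both sides take the dim_i fallback
    have hz : (pvZipNames "xyzct".toList (a :: b :: c :: d :: e :: f :: rest).reverse).length = 5 := by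
      rw [pvZipNames_length]
      simp
    simp only [infer_dimension_names_py, infer_dimension_names_py_alt]
    have hlen : (a :: b :: c :: d :: e :: f :: rest).length = rest.length + 6 := by simp
    rw [hlen]
    simp only [hz]
    split_ifs <;> first | rfl | omega

-- ===== VERDICT =====
theorem infer_dimension_names_py_spec : Claim_equal_infer_dimension_names_py := by
  intro shape _
  exact infer_agree shape
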